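-- pv_equiv track=rewrite | github.com/YuntianCheng/Leetcode | m_1_1.py | solution
-- ===== SOURCE A (Python) =====
-- def solution(S, B):
--     # write your code in Python (Python 3.6)
--     count = 0
--     poles_num = []
--     for s in S:
--         if s == 'X':
--             count += 1
--         else:
--             if count > 0:
--                 poles_num.append(count)
--                 count = 0
--     if count > 0:
--         poles_num.append(count)
--     poles_num.sort(reverse=True)
--     result = 0
--     for num in poles_num:
--         if num + 1 < B:
--             result += num
--             B = B-num-1
--         else:
--             result += (B-1)
--             break
--     return result
-- ===== SOURCE B (Python) =====
-- def solution(S, B):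
--     # counting-sort variant: tally run lengths into buckets, walk buckets from
--     # the longest run down, applying the greedy step cnt[L] times per bucket.
--     n = len(S)
--     cnt = [0] * (n + 1)
--     run = 0
--     for ch in S:
--         if ch == 'X':
--             run += 1
--         else:
--             cnt[run] += 1
--             run = 0
--     cnt[run] += 1
--     result = 0
--     for L in range(n, 0, -1):
--         for _ in range(cnt[L]):
--             if L + 1 < B:
--                 result += L
--                 B -= L + 1
--             else:
--                 return result + (B - 1)
--     return result
-- ===== Notes on version B (the rewrite author's own statement) =====
-- stated objective: alternative
-- what changed: B replaces A's build-list-then-comparison-sort of the X-run lengths by a counting sort: runs are tallied into a bucket array indexed by length, then the buckets are walked from the longest length down, applying the same greedy step once per tallied run.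
import Mathlib
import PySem

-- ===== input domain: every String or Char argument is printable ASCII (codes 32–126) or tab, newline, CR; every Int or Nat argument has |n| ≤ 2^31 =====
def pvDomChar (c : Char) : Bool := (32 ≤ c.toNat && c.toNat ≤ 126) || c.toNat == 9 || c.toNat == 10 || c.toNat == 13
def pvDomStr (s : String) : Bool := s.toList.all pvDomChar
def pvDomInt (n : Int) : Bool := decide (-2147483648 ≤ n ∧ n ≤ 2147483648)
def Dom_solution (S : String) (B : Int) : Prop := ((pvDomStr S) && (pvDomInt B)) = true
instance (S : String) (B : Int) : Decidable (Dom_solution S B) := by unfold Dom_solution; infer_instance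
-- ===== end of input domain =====

-- B replaces A's comparison sort of the run lengths by a counting-sort bucket walk
-- (tally runs by length, walk buckets from the longest length down), same greedy step.

-- ===== PORT A =====
-- loop body of A's scan over S (count the current 'X'-run, flush it on a non-'X')
def stepA (st : Int × List Int) (s : Char) : Int × List Int :=
  if s = 'X' then (st.1 + 1, st.2) else if st.1 > 0 then (0, st.2 ++ [st.1]) else st

-- A's greedy loop, with its early break (`else: result += B-1; break`)
def greedyA : List Int → Int → Int → Int
  | [], _, result => result
  | num :: rest, B, result =>
      if num + 1 < B then greedyA rest (B - num - 1) (result + num)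
      else result + (B - 1)

-- poles_num after the scan and the trailing `if count > 0: append`
def polesOf (S : String) : List Int :=
  if (S.toList.foldl stepA ((0 : Int), ([] : List Int))).1 > 0
  then (S.toList.foldl stepA ((0 : Int), ([] : List Int))).2
        ++ [(S.toList.foldl stepA ((0 : Int), ([] : List Int))).1]
  else (S.toList.foldl stepA ((0 : Int), ([] : List Int))).2

def solution (S : String) (B : Int) : Int :=
  greedyA (PySem.List.sorted (polesOf S) (fun x => x) true) B 0

-- ===== PORT B =====
-- loop body of B's scan over S (tally the finished run into bucket cnt[run])
def stepB (st : List Int × Int) (ch : Char) : List Int × Int :=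
  if ch = 'X' then (st.1, st.2 + 1)
  else (st.1.set st.2.toNat (st.1.getD st.2.toNat 0 + 1), 0)

-- the finished cnt array: scan plus the trailing `cnt[run] += 1`
def cntOf (S : String) : List Int :=
  (S.toList.foldl stepB (List.replicate (S.toList.length + 1) (0 : Int), (0 : Int))).1.set
    (S.toList.foldl stepB (List.replicate (S.toList.length + 1) (0 : Int), (0 : Int))).2.toNat
    ((S.toList.foldl stepB (List.replicate (S.toList.length + 1) (0 : Int), (0 : Int))).1.getD
       (S.toList.foldl stepB (List.replicate (S.toList.length + 1) (0 : Int), (0 : Int))).2.toNat 0 + 1)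

-- one bucket: `for _ in range(cnt[L])` of the greedy step; Bool = early `return` taken
def bucketB (L : Int) : Nat → Int → Int → Int × Int × Bool
  | 0, B, r => (B, r, false)
  | k + 1, B, r =>
      if L + 1 < B then bucketB L k (B - L - 1) (r + L) else (B, r + (B - 1), true)

-- `for L in range(n, 0, -1)` walking the buckets from the longest run down
def walkB (cnt : List Int) : Nat → Int → Int → Int
  | 0, _, r => r
  | L + 1, B, r =>
      let p := bucketB ((L : Int) + 1) (cnt.getD (L + 1) 0).toNat B r
      if p.2.2 then p.2.1 else walkB cnt L p.1 p.2.1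

def solution_alt (S : String) (B : Int) : Int :=
  walkB (cntOf S) S.toList.length B 0

-- ===== PRECONDITION & SPEC =====
def Spec_solution (S : String) (B : Int) (out : Int) : Prop := out = solution_alt S B
instance (S : String) (B : Int) (out : Int) : Decidable (Spec_solution S B out) := by unfold Spec_solution; infer_instance

-- ===== CLAIM (what is proved, stated in full; the proofs are below) =====
def Claim_equal_solution : Prop := ∀ (S : String) (B : Int), Dom_solution S B → Spec_solution S B (solution S B)

-- ===== LEMMAS AND PROOFS =====

theorem getD_set_self (l : List Int) (i : Nat) (a : Int) (h : i < l.length) :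
    (l.set i a).getD i 0 = a := by
  simp [List.getD, h]

theorem getD_set_ne (l : List Int) (i j : Nat) (a : Int) (h : i ≠ j) :
    (l.set i a).getD j 0 = l.getD j 0 := by
  simp [List.getD, List.getElem?_set_ne h]

theorem getD_replicate (k i : Nat) : (List.replicate k (0 : Int)).getD i 0 = 0 := by
  simp [List.getD, List.getElem?_replicate]
  split_ifs <;> simp

-- the list of run lengths B's bucket walk processes, from bucket L down to 1
def expand (cnt : List Int) : Nat → List Int
  | 0 => []
  | L + 1 => List.replicate (cnt.getD (L + 1) 0).toNat ((L : Int) + 1) ++ expand cnt L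

theorem bucket_greedy (L : Int) : ∀ (k : Nat) (B r : Int) (rest : List Int),
    greedyA (List.replicate k L ++ rest) B r =
      (let p := bucketB L k B r; if p.2.2 then p.2.1 else greedyA rest p.1 p.2.1) := by
  intro k
  induction k with
  | zero => intro B r rest; simp [bucketB]
  | succ k ih =>
      intro B r rest
      simp only [List.replicate_succ, List.cons_append, greedyA, bucketB]
      by_cases h : L + 1 < B
      · simp only [if_pos h]; exact ih _ _ _
      · simp [if_neg h]

theorem walk_greedy (cnt : List Int) : ∀ (L : Nat) (B r : Int),
    walkB cnt L B r = greedyA (expand cnt L) B r := by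
  intro L
  induction L with
  | zero => intro B r; simp [walkB, expand, greedyA]
  | succ L ih =>
      intro B r
      rw [expand, bucket_greedy]
      simp only [walkB, ih, List.getD]

theorem mem_expand (cnt : List Int) : ∀ (L : Nat) (x : Int), x ∈ expand cnt L → 1 ≤ x ∧ x ≤ (L : Int) := by
  intro L
  induction L with
  | zero => simp [expand]
  | succ L ih =>
      intro x hx
      simp only [expand, List.mem_append, List.mem_replicate] at hx
      rcases hx with ⟨-, rfl⟩ | hx
      · constructor <;> push_cast <;> omega
      · have := ih x hx
        constructor
        · exact this.1
        · push_cast; omega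

theorem expand_pairwise (cnt : List Int) : ∀ (L : Nat), (expand cnt L).Pairwise (fun a b => b ≤ a) := by
  intro L
  induction L with
  | zero => simp [expand]
  | succ L ih =>
      rw [expand, List.pairwise_append]
      refine ⟨List.pairwise_replicate.mpr (Or.inr le_rfl), ih, ?_⟩
      intro x hx y hy
      have hx' := (List.mem_replicate.mp hx).2
      have hy' := (mem_expand cnt L y hy).2
      subst hx'
      push_cast at hy' ⊢
      omega

theorem count_expand (cnt : List Int) : ∀ (L : Nat) (v : Int),
    (expand cnt L).count v = if 1 ≤ v ∧ v ≤ (L : Int) then (cnt.getD v.toNat 0).toNat else 0 := by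
  intro L
  induction L with
  | zero =>
      intro v
      rw [expand]
      simp only [List.count_nil]
      split_ifs with h
      · exfalso; push_cast at h; omega
      · rfl
  | succ L ih =>
      intro v
      rw [expand, List.count_append, ih v]
      by_cases hv : v = (L : Int) + 1
      · subst hv
        have h1 : ¬ (1 ≤ (L : Int) + 1 ∧ (L : Int) + 1 ≤ (L : Int)) := by push_cast; omega
        have h2 : (1 ≤ (L : Int) + 1 ∧ (L : Int) + 1 ≤ ((L + 1 : Nat) : Int)) := by push_cast; omega
        have h3 : ((L : Int) + 1).toNat = L + 1 := by omega
        rw [if_neg h1, if_pos h2, h3]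
        simp [List.count_replicate_self]
      · have h0 : (List.replicate (cnt.getD (L + 1) 0).toNat ((L : Int) + 1)).count v = 0 := by
          exact List.count_eq_zero.mpr (by simp [List.mem_replicate, hv])
        rw [h0]
        by_cases h1 : 1 ≤ v ∧ v ≤ (L : Int)
        · have h2 : 1 ≤ v ∧ v ≤ ((L + 1 : Nat) : Int) := by push_cast; push_cast at h1; omega
          rw [if_pos h1, if_pos h2]
          exact Nat.zero_add _
        · have h2 : ¬ (1 ≤ v ∧ v ≤ ((L + 1 : Nat) : Int)) := by
            push_cast; push_cast at h1 hv; omega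
          rw [if_neg h1, if_neg h2]

-- the joint invariant of A's scan and B's scan
theorem scan_inv (N : Nat) : ∀ (cs : List Char) (m : Nat) (c : Int) (ps cnt : List Int),
    m + cs.length ≤ N → 0 ≤ c → c ≤ (m : Int) → cnt.length = N + 1 →
    (∀ p ∈ ps, 1 ≤ p ∧ p ≤ (m : Int)) →
    (∀ v : Int, 1 ≤ v → cnt.getD v.toNat 0 = (ps.count v : Int)) →
    ((cs.foldl stepA (c, ps)).1 = (cs.foldl stepB (cnt, c)).2 ∧
     0 ≤ (cs.foldl stepA (c, ps)).1 ∧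
     (cs.foldl stepA (c, ps)).1 ≤ ((m + cs.length : Nat) : Int) ∧
     (cs.foldl stepB (cnt, c)).1.length = N + 1 ∧
     (∀ p ∈ (cs.foldl stepA (c, ps)).2, 1 ≤ p ∧ p ≤ ((m + cs.length : Nat) : Int)) ∧
     (∀ v : Int, 1 ≤ v → (cs.foldl stepB (cnt, c)).1.getD v.toNat 0 = ((cs.foldl stepA (c, ps)).2.count v : Int))) := by
  intro cs
  induction cs with
  | nil =>
      intro m c ps cnt h1 h2 h3 h4 h5 h6
      simp only [List.foldl_nil, List.length_nil, Nat.add_zero]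
      exact ⟨by trivial, h2, h3, h4, h5, h6⟩
  | cons ch cs ih =>
      intro m c ps cnt h1 h2 h3 h4 h5 h6
      have hlen : (m + 1) + cs.length = m + (ch :: cs).length := by simp; omega
      by_cases hx : ch = 'X'
      · subst hx
        simp only [List.foldl_cons, stepA, stepB, if_pos]
        rw [← hlen]
        exact ih (m + 1) (c + 1) ps cnt (by simp at h1 ⊢; omega) (by omega)
          (by push_cast; push_cast at h3; omega) h4
          (fun p hp => ⟨(h5 p hp).1, by have := (h5 p hp).2; push_cast; push_cast at this; omega⟩)
          h6
      · by_cases hc : c > 0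
        · simp only [List.foldl_cons, stepA, stepB, if_neg hx, if_pos hc]
          rw [← hlen]
          refine ih (m + 1) 0 (ps ++ [c]) _ (by simp at h1 ⊢; omega) le_rfl (by positivity) (by simp [h4]) ?_ ?_
          · intro p hp
            rcases List.mem_append.mp hp with hp | hp
            · exact ⟨(h5 p hp).1, by have := (h5 p hp).2; push_cast; push_cast at this; omega⟩
            · have : p = c := by simpa using hp
              subst this
              exact ⟨by omega, by push_cast; push_cast at h3; omega⟩
          · intro v hv
            have hcN : c.toNat < cnt.length := by simp at h1; rw [h4]; omega
            by_cases hvc : v = c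
            · subst hvc
              rw [getD_set_self _ _ _ hcN, h6 v (by omega)]
              simp [List.count_append]
            · rw [getD_set_ne _ _ _ _ (by omega : c.toNat ≠ v.toNat), h6 v hv]
              have h0 : List.count v [c] = 0 := List.count_eq_zero.mpr (by simp [hvc])
              simp [List.count_append, h0]
        · have hc0 : c = 0 := by omega
          subst hc0
          simp only [List.foldl_cons, stepA, stepB, if_neg hx, if_neg hc]
          rw [← hlen]
          refine ih (m + 1) 0 ps _ (by simp at h1 ⊢; omega) le_rfl (by positivity) (by simp [h4]) ?_ ?_
          · intro p hp
            exact ⟨(h5 p hp).1, by have := (h5 p hp).2; push_cast; push_cast at this; omega⟩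
          · intro v hv
            rw [getD_set_ne _ _ _ _ (by omega : (0 : Int).toNat ≠ v.toNat)]
            exact h6 v hv

-- the two finished scans agree: cnt tallies exactly the pole lengths, all in [1, |S|]
theorem poles_cnt (S : String) :
    (∀ p ∈ polesOf S, 1 ≤ p ∧ p ≤ (S.toList.length : Int)) ∧
    (∀ v : Int, 1 ≤ v → (cntOf S).getD v.toNat 0 = ((polesOf S).count v : Int)) := by
  have key := scan_inv S.toList.length S.toList 0 0 [] (List.replicate (S.toList.length + 1) 0)
    (by simp) le_rfl (by simp) (by simp) (by simp) (by intro v hv; rw [getD_replicate]; simp)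
  obtain ⟨e1, e2, e3, e4, e5, e6⟩ := key
  simp only [Nat.zero_add] at e3 e5
  unfold polesOf cntOf
  constructor
  · intro p hp
    by_cases hc : (S.toList.foldl stepA ((0 : Int), ([] : List Int))).1 > 0
    · rw [if_pos hc] at hp
      rcases List.mem_append.mp hp with hp | hp
      · exact e5 p hp
      · have : p = (S.toList.foldl stepA ((0 : Int), ([] : List Int))).1 := by simpa using hp
        subst this
        exact ⟨by omega, e3⟩
    · rw [if_neg hc] at hp
      exact e5 p hp
  · intro v hv
    have hb2 : (S.toList.foldl stepB (List.replicate (S.toList.length + 1) (0 : Int), (0 : Int))).2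
        = (S.toList.foldl stepA ((0 : Int), ([] : List Int))).1 := e1.symm
    by_cases hc : (S.toList.foldl stepA ((0 : Int), ([] : List Int))).1 > 0
    · rw [if_pos hc]
      have hiN : (S.toList.foldl stepB (List.replicate (S.toList.length + 1) (0 : Int), (0 : Int))).2.toNat
          < (S.toList.foldl stepB (List.replicate (S.toList.length + 1) (0 : Int), (0 : Int))).1.length := by
        rw [e4, hb2]; omega
      by_cases hvc : v = (S.toList.foldl stepA ((0 : Int), ([] : List Int))).1
      · rw [hvc, ← hb2, getD_set_self _ _ _ hiN, hb2, e6 _ (by rw [← hvc]; exact hv)]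
        simp [List.count_append]
      · rw [getD_set_ne _ _ _ _ (by rw [hb2]; omega :
            (S.toList.foldl stepB (List.replicate (S.toList.length + 1) (0 : Int), (0 : Int))).2.toNat ≠ v.toNat),
          e6 v hv]
        have h0 : List.count v [(S.toList.foldl stepA ((0 : Int), ([] : List Int))).1] = 0 :=
          List.count_eq_zero.mpr (by simp [hvc])
        simp [List.count_append, h0]
    · rw [if_neg hc]
      have hc0 : (S.toList.foldl stepA ((0 : Int), ([] : List Int))).1 = 0 := by omega
      rw [getD_set_ne _ _ _ _ (by rw [hb2, hc0]; omega :
            (S.toList.foldl stepB (List.replicate (S.toList.length + 1) (0 : Int), (0 : Int))).2.toNat ≠ v.toNat)]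
      exact e6 v hv

-- sorted(poles, reverse=True) is exactly B's bucket expansion
theorem sorted_eq_expand (poles cnt : List Int) (n : Nat)
    (hmem : ∀ p ∈ poles, 1 ≤ p ∧ p ≤ (n : Int))
    (hcount : ∀ v : Int, 1 ≤ v → cnt.getD v.toNat 0 = (poles.count v : Int)) :
    PySem.List.sorted poles (fun x => x) true = expand cnt n := by
  have hperm : (expand cnt n).Perm poles := by
    refine List.perm_iff_count.mpr fun v => ?_
    rw [count_expand]
    by_cases h1 : 1 ≤ v ∧ v ≤ (n : Int)
    · rw [if_pos h1, hcount v h1.1]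
      exact Int.toNat_natCast _
    · rw [if_neg h1]
      refine (List.count_eq_zero.mpr fun hmem' => h1 (hmem v hmem')).symm
  have hs : (PySem.List.sorted poles (fun x => x) true).Pairwise (fun a b => b ≤ a) := by
    have := PySem.List.sorted_pairwise_rev poles (fun x : Int => x)
    simpa using this
  have hp : (PySem.List.sorted poles (fun x => x) true).Perm (expand cnt n) :=
    (PySem.List.sorted_perm ..).trans hperm.symm
  exact hp.eq_of_pairwise (fun a b _ _ x y => le_antisymm y x) hs (expand_pairwise cnt n)

-- ===== VERDICT (by name: the statement is the Claim_ definition above) =====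
theorem solution_spec : Claim_equal_solution := by
  intro S B _
  unfold Spec_solution solution solution_alt
  obtain ⟨hmem, hcount⟩ := poles_cnt S
  rw [walk_greedy, sorted_eq_expand (polesOf S) (cntOf S) S.toList.length hmem hcount]
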